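-- pv_equiv track=rewrite | github.com/nanusefue/CAP2-1 | cap2/extensions/experimental/tcems/tcem_aa_db.py | get_taxa
-- ===== SOURCE A (Python) =====
-- def get_taxa(val):
--     out, taxon, inblock = set(), '', False
--     for char in val:
--         if char == '[':
--             inblock = True
--         elif char == ']':
--             out.add(taxon)
--             inblock = False
--             taxon = ''
--         elif inblock:
--             taxon += char
--     return out
-- ===== SOURCE B (Python) =====
-- def get_taxa(val):
--     # split-based decomposition: one bracket-token per ']'-terminated segment
--     out = set()
--     for seg in val.split(']')[:-1]:
--         out.add(''.join(seg.split('[')[1:]))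
--     return out
-- ===== Notes on version B (the rewrite author's own statement) =====
-- stated objective: simpler
-- what changed: Replaces the character-level state machine (inblock flag, running taxon accumulator) with a split-based decomposition: split on ']' and, per segment, join everything after its first '['; the C-level str.split/join also makes it measurably faster than the per-character Python loop.
import Mathlib
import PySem

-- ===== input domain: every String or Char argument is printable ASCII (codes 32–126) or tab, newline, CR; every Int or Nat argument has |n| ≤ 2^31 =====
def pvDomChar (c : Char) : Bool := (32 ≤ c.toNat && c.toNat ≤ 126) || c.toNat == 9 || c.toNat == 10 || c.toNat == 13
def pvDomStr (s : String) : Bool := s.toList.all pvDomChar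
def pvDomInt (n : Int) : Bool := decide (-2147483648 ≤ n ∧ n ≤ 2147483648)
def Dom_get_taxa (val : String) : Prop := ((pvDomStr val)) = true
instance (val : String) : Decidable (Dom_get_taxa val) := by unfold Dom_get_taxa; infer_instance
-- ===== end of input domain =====

-- B replaces A's character-level state machine by a split-on-']' decomposition (simpler; same O(n) cost).

-- ===== PORT A =====
-- char-by-char state machine: state = (out set, current taxon chars, inblock flag)
def get_taxa (val : String) : List String :=
  (val.toList.foldl
    (fun (st : PySem.Set String × List Char × Bool) c =>
      if c = '[' then (st.1, st.2.1, true)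
      else if c = ']' then (PySem.Set.add st.1 (String.mk st.2.1), [], false)
      else if st.2.2 then (st.1, st.2.1 ++ [c], st.2.2)
      else st)
    (PySem.Set.empty, [], false)).1

-- ===== PORT B =====
-- for seg in val.split(']')[:-1]: out.add(''.join(seg.split('[')[1:]))
def get_taxa_alt (val : String) : List String :=
  (PySem.List.slice (PySem.Chars.splitOn val.toList [']']) none (some (-1))).foldl
    (fun out seg =>
      PySem.Set.add out
        (String.mk (PySem.Chars.join []
          (PySem.List.slice (PySem.Chars.splitOn seg ['[']) (some 1) none))))
    PySem.Set.empty

-- ===== PRECONDITION & SPEC =====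
def Spec_get_taxa (val : String) (out : List String) : Prop := out = get_taxa_alt val
instance (val : String) (out : List String) : Decidable (Spec_get_taxa val out) := by unfold Spec_get_taxa; infer_instance

-- ===== CLAIM (what is proved, stated in full; the proofs are below) =====
def Claim_equal_get_taxa : Prop := ∀ (val : String), Dom_get_taxa val → Spec_get_taxa val (get_taxa val)

-- ===== LEMMAS AND PROOFS =====

-- structural single-char split (proved equal to PySem.Chars.splitOn with a one-char separator)
def mySplit (d : Char) : List Char → List (List Char)
  | [] => [[]]
  | c :: rest => if c = d then [] :: mySplit d rest else (mySplit d rest).modifyHead (c :: ·)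

theorem mySplit_ne_nil (d : Char) (l : List Char) : mySplit d l ≠ [] := by
  induction l with
  | nil => simp [mySplit]
  | cons c rest ih =>
    simp only [mySplit]
    split_ifs
    · simp
    · cases h : mySplit d rest with
      | nil => exact absurd h ih
      | cons a b => simp [List.modifyHead]

theorem splitOn_go_eq (d : Char) (l cur : List Char) (acc : List (List Char)) (fuel : Nat)
    (hf : l.length < fuel) :
    PySem.Chars.splitOn.go [d] fuel l cur acc
      = acc.reverse ++ (mySplit d l).modifyHead (cur.reverse ++ ·) := by
  induction l generalizing cur acc fuel with
  | nil =>
    cases fuel with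
    | zero => omega
    | succ f => rw [PySem.Chars.splitOn.go.eq_def]; simp [mySplit]
  | cons c rest ih =>
    cases fuel with
    | zero => omega
    | succ f =>
      rw [PySem.Chars.splitOn.go.eq_def]
      simp only [List.isPrefixOf, Bool.and_true]
      by_cases hc : c = d
      · have hbeq : (d == c) = true := by simp [hc]
        simp only [hbeq, if_true, List.length_cons, List.length_nil, List.drop_succ_cons,
          List.drop_zero]
        rw [ih [] (cur.reverse :: acc) f (by simp at hf; omega)]
        simp only [mySplit, if_pos hc, List.modifyHead, List.reverse_cons, List.nil_append,
          List.append_assoc, List.cons_append]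
        cases h : mySplit d rest with
        | nil => exact absurd h (mySplit_ne_nil d rest)
        | cons a b => simp
      · have hbeq : (d == c) = false := beq_eq_false_iff_ne.mpr (fun h => hc h.symm)
        simp only [hbeq, Bool.false_eq_true, if_false]
        rw [ih (c :: cur) acc f (by simp at hf ⊢; omega)]
        simp only [mySplit, if_neg hc]
        cases h : mySplit d rest with
        | nil => exact absurd h (mySplit_ne_nil d rest)
        | cons a b => simp [List.modifyHead]

theorem splitOn_eq (d : Char) (l : List Char) :
    PySem.Chars.splitOn l [d] = mySplit d l := by
  show PySem.Chars.splitOn.go [d] (l.length + 1) l [] [] = _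
  rw [splitOn_go_eq d l [] [] (l.length + 1) (by omega)]
  cases h : mySplit d l with
  | nil => exact absurd h (mySplit_ne_nil d l)
  | cons a b => simp

-- flattening the split restores the string minus the separator
theorem flatten_mySplit (d : Char) (l : List Char) :
    (mySplit d l).flatten = l.filter (fun c => !(c == d)) := by
  induction l with
  | nil => simp [mySplit]
  | cons c rest ih =>
    simp only [mySplit]
    by_cases hc : c = d
    · simp [hc, ih]
    · cases h : mySplit d rest with
      | nil => exact absurd h (mySplit_ne_nil d rest)
      | cons a b =>
        simp only [List.modifyHead]
        have := ih; rw [h] at this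
        simp only [List.flatten_cons] at this
        simp [hc, this]

-- the taxon-accumulator run over a ']'-free stretch (defined totally)
def tokState : List Char → List Char → Bool → List Char
  | [], t, _ => t
  | c :: s, t, b =>
      if c = '[' then tokState s t true
      else if b then tokState s (t ++ [c]) true
      else tokState s t false

theorem tokState_true (seg : List Char) (t : List Char) :
    tokState seg t true = t ++ seg.filter (fun c => !(c == '[')) := by
  induction seg generalizing t with
  | nil => simp [tokState]
  | cons c s ih =>
    simp only [tokState]
    by_cases hc : c = '['
    · simp [hc, ih]
    · simp [ih, hc]

theorem tokState_false (seg : List Char) (t : List Char) :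
    tokState seg t false = t ++ (mySplit '[' seg).tail.flatten := by
  induction seg generalizing t with
  | nil => simp [tokState, mySplit]
  | cons c s ih =>
    by_cases hc : c = '['
    · subst hc
      simp [tokState, mySplit, tokState_true, flatten_mySplit]
    · simp only [tokState, if_neg hc, ih, mySplit]
      cases h : mySplit '[' s with
      | nil => exact absurd h (mySplit_ne_nil '[' s)
      | cons a b => simp [List.modifyHead]

-- the list of taxa A emits, from taxon state (t, b)
def emitted : List Char → List Char → Bool → List String
  | [], _, _ => []
  | c :: rest, t, b =>
      if c = '[' then emitted rest t true
      else if c = ']' then String.mk t :: emitted rest [] false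
      else if b then emitted rest (t ++ [c]) b
      else emitted rest t b

-- A's fold = folding Set.add over `emitted`
theorem foldA_eq_emitted (cs : List Char) (out : PySem.Set String) (t : List Char) (b : Bool) :
    (cs.foldl
      (fun (st : PySem.Set String × List Char × Bool) c =>
        if c = '[' then (st.1, st.2.1, true)
        else if c = ']' then (PySem.Set.add st.1 (String.mk st.2.1), [], false)
        else if st.2.2 then (st.1, st.2.1 ++ [c], st.2.2)
        else st)
      (out, t, b)).1 = (emitted cs t b).foldl PySem.Set.add out := by
  induction cs generalizing out t b with
  | nil => simp [emitted]
  | cons c rest ih =>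
    simp only [List.foldl_cons, emitted]
    by_cases h1 : c = '['
    · simp [h1, ih]
    · by_cases h2 : c = ']'
      · simp [h2, ih]
      · by_cases h3 : b
        · simp [h1, h2, h3, ih]
        · simp [h1, h2, h3, ih]

-- the per-segment tokens, first segment continuing from taxon state (t, b)
def segTokens (t : List Char) (b : Bool) : List (List Char) → List String
  | [] => []
  | seg :: rest =>
      if rest = [] then []
      else String.mk (tokState seg t b)
             :: rest.dropLast.map (fun s => String.mk (tokState s [] false))

theorem emitted_eq (cs : List Char) (t : List Char) (b : Bool) :
    emitted cs t b = segTokens t b (mySplit ']' cs) := by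
  induction cs generalizing t b with
  | nil => simp [emitted, mySplit, segTokens]
  | cons c cs' ih =>
    by_cases h2 : c = ']'
    · subst h2
      simp only [emitted, if_neg (by decide : ¬ (']' = '[')), mySplit]
      rw [ih]
      cases h : mySplit ']' cs' with
      | nil => exact absurd h (mySplit_ne_nil ']' cs')
      | cons seg' rest' =>
        cases rest' with
        | nil => simp [segTokens, tokState]
        | cons a b' =>
          simp [segTokens, tokState]
    · by_cases h1 : c = '['
      · subst h1
        simp only [emitted, mySplit, if_neg (by decide : ¬ ('[' = ']'))]
        rw [ih]
        cases h : mySplit ']' cs' with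
        | nil => exact absurd h (mySplit_ne_nil ']' cs')
        | cons seg' rest' => simp [List.modifyHead, segTokens, tokState]
      · by_cases h3 : b
        · simp only [emitted, if_neg h1, if_neg h2, h3]
          rw [ih]
          simp only [mySplit, if_neg h2]
          cases h : mySplit ']' cs' with
          | nil => exact absurd h (mySplit_ne_nil ']' cs')
          | cons seg' rest' => simp [List.modifyHead, segTokens, tokState, h1]
        · simp only [emitted, if_neg h1, if_neg h2, h3, Bool.false_eq_true, if_false]
          rw [ih]
          simp only [mySplit, if_neg h2]
          cases h : mySplit ']' cs' with
          | nil => exact absurd h (mySplit_ne_nil ']' cs')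
          | cons seg' rest' => simp [List.modifyHead, segTokens, tokState, h1]

-- from the initial state, the tokens are exactly one per dropped-last segment
theorem segTokens_init (l : List (List Char)) :
    segTokens [] false l = l.dropLast.map (fun s => String.mk (tokState s [] false)) := by
  cases l with
  | nil => rfl
  | cons seg rest =>
    cases rest with
    | nil => simp [segTokens]
    | cons a b =>
      simp [segTokens]

theorem flatten_intersperse_nil (l : List (List Char)) :
    (List.intersperse [] l).flatten = l.flatten := by
  induction l with
  | nil => rfl
  | cons a t ih =>
    cases t with
    | nil => rfl
    | cons b u => simp_all [List.intersperse]

-- A's token for a segment = B's token for that segment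
theorem tok_eq (s : List Char) :
    String.mk (tokState s [] false)
      = String.mk (PySem.Chars.join []
          (PySem.List.slice (PySem.Chars.splitOn s ['[']) (some 1) none)) := by
  rw [tokState_false, splitOn_eq, PySem.List.slice_from_one]
  simp [PySem.Chars.join, List.intercalate, flatten_intersperse_nil]

-- folding Set.add over the mapped tokens is B's loop
theorem fold_map_tokens (l : List (List Char)) (out : PySem.Set String) :
    (l.map (fun s => String.mk (tokState s [] false))).foldl PySem.Set.add out
      = l.foldl
          (fun o seg =>
            PySem.Set.add o
              (String.mk (PySem.Chars.join []
                (PySem.List.slice (PySem.Chars.splitOn seg ['[']) (some 1) none)))) out := by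
  induction l generalizing out with
  | nil => rfl
  | cons x xs ih =>
    simp only [List.map_cons, List.foldl_cons, tok_eq x, ih]

-- ===== VERDICT (by name: the statement is the Claim_ definition above) =====
theorem get_taxa_spec : Claim_equal_get_taxa := by
  intro val _
  show get_taxa val = get_taxa_alt val
  unfold get_taxa get_taxa_alt
  rw [foldA_eq_emitted, emitted_eq, segTokens_init, PySem.List.slice_to_neg_one, splitOn_eq,
    fold_map_tokens]
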